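-- pv_equiv track=rewrite | github.com/sowiwia/IP-Algo1 | Guías/integradores_python.py | subsecuencia_mas_larga
-- ===== SOURCE A (Python) =====
-- def subsecuencia_mas_larga(v: list[int]) -> tuple[int, int]:
--     inicio_secuencia_max: int = 0
--     inicio_secuencia_actual: int = 0
--     longitud_secuencia_max: int = 1
--     longitud_secuencia_actual: int = 1
--
--     for i in range(1, len(v)):
--         diferencia = v[i] - v[i - 1]
--         if diferencia == 1 or diferencia == -1:
--             longitud_secuencia_actual += 1 #empieza a contar la longitud de la secuencia, el indice queda en 0
--         else: #si llega el momento en el que la diferencia no es de 1...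
--             if longitud_secuencia_actual > longitud_secuencia_max: # queremos ver cuál es la más larga, entonces comparamos la actual con la máximoa
--                 longitud_secuencia_max = longitud_secuencia_actual
--                 inicio_secuencia_max = inicio_secuencia_actual # actualizamos todo pim pam
--
--             longitud_secuencia_actual = 1 # la longitud se reinicia a 1
--             inicio_secuencia_actual = i # el nuevo inicio es la posicion en la que se cortó la subsecuencia (mientras iba evaluando)
--
--     if longitud_secuencia_actual > longitud_secuencia_max: # esto es para ver si la subseq más larga era justo la última
--         longitud_secuencia_max = longitud_secuencia_actual
--         inicio_secuencia_max = inicio_secuencia_actual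
--
--     tupla: tuple[int, int] = (longitud_secuencia_max, inicio_secuencia_max)
--     return tupla
-- ===== SOURCE B (Python) =====
-- def subsecuencia_mas_larga(v: list[int]) -> tuple[int, int]:
--     n = len(v)
--     breaks = [i for i in range(1, n) if v[i] - v[i - 1] not in (1, -1)]
--     boundaries = [0] + breaks + [n]
--     best_len, best_start = 1, 0
--     for s, e in zip(boundaries, boundaries[1:]):
--         if e - s > best_len:
--             best_len, best_start = e - s, s
--     return (best_len, best_start)
-- ===== Notes on version B (the rewrite author's own statement) =====
-- stated objective: alternative
-- what changed: Two-phase decomposition: first collect all break indices (where the step is not +-1) in one comprehension, then scan the resulting segment boundaries and keep the first strictly longest segment, instead of A's single loop carrying current-run and best-run state.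
import Mathlib
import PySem

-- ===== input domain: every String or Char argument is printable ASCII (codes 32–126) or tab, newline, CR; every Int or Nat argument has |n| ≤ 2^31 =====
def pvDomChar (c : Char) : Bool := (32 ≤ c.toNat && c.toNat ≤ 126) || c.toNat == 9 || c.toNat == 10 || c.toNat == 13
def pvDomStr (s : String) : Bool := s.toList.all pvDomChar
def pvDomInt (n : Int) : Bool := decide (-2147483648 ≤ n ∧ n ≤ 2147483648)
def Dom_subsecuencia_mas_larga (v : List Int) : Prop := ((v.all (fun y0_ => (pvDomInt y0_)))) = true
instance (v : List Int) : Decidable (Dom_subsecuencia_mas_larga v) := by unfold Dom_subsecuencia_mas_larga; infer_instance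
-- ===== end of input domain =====

-- B replaces A's single stateful scan by a two-phase decomposition (collect break indices, then
-- scan segment boundaries for the first strictly longest segment); objective: alternative.


-- ===== PORT A =====
-- state = (inicio_secuencia_max, inicio_secuencia_actual, longitud_secuencia_max, longitud_secuencia_actual)
def pvStepA (v : List Int) (st : Int × Int × Int × Int) (i : Int) : Int × Int × Int × Int :=
  let d := PySem.List.pyGetD v i 0 - PySem.List.pyGetD v (i - 1) 0
  if d == 1 || d == -1 then
    (st.1, st.2.1, st.2.2.1, st.2.2.2 + 1)
  else
    if st.2.2.2 > st.2.2.1 then (st.2.1, i, st.2.2.2, 1)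
    else (st.1, i, st.2.2.1, 1)

def subsecuencia_mas_larga (v : List Int) : Int × Int :=
  let st := (PySem.List.pyRange 1 (v.length : Int) 1).foldl (pvStepA v) (0, 0, 1, 1)
  if st.2.2.2 > st.2.2.1 then (st.2.2.2, st.2.1) else (st.2.2.1, st.1)

-- ===== PORT B =====
def pvIsBreak (v : List Int) (i : Int) : Bool :=
  let d := PySem.List.pyGetD v i 0 - PySem.List.pyGetD v (i - 1) 0
  !(d == 1 || d == -1)

def pvStepB (best : Int × Int) (p : Int × Int) : Int × Int :=
  if p.2 - p.1 > best.1 then (p.2 - p.1, p.1) else best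

def subsecuencia_mas_larga_alt (v : List Int) : Int × Int :=
  let n : Int := v.length
  let breaks := (PySem.List.pyRange 1 n 1).filter (pvIsBreak v)
  let boundaries := 0 :: (breaks ++ [n])
  (boundaries.zip boundaries.tail).foldl pvStepB (1, 0)

-- ===== PRECONDITION & SPEC =====
def Spec_subsecuencia_mas_larga (v : List Int) (out : Int × Int) : Prop := out = subsecuencia_mas_larga_alt v
instance (v : List Int) (out : Int × Int) : Decidable (Spec_subsecuencia_mas_larga v out) := by unfold Spec_subsecuencia_mas_larga; infer_instance

-- ===== CLAIM (what is proved, stated in full; the proofs are below) =====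
def Claim_equal_subsecuencia_mas_larga : Prop := ∀ (v : List Int), Dom_subsecuencia_mas_larga v → Spec_subsecuencia_mas_larga v (subsecuencia_mas_larga v)

-- ===== LEMMAS AND PROOFS =====
def pvFinish (st : Int × Int × Int × Int) : Int × Int :=
  if st.2.2.2 > st.2.2.1 then (st.2.2.2, st.2.1) else (st.2.2.1, st.1)

def pvPairs (l : List Int) : List (Int × Int) := l.zip l.tail

lemma pvPairs_cons (a b : Int) (l : List Int) :
    pvPairs (a :: b :: l) = (a, b) :: pvPairs (b :: l) := rfl

-- Invariant: if the current run started at ica (so its length so far is j - ica) and the best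
-- completed segment so far is (lms, ims), then finishing A's loop from index j equals B's
-- boundary scan over the remaining breaks, seeded with (lms, ims) and left endpoint ica.
lemma pvMain (v : List Int) : ∀ (k : ℕ) (j ims ica lms : Int),
    j = (v.length : Int) - k → 1 ≤ j →
    pvFinish ((PySem.List.pyRange j (v.length : Int) 1).foldl (pvStepA v) (ims, ica, lms, j - ica)) =
      (pvPairs (ica :: ((PySem.List.pyRange j (v.length : Int) 1).filter (pvIsBreak v) ++ [(v.length : Int)]))).foldl pvStepB (lms, ims) := by
  intro k
  induction k with
  | zero =>
      intro j ims ica lms hj _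
      have hj' : j = (v.length : Int) := by omega
      subst hj'
      rw [PySem.List.pyRange_one_eq_nil (by omega)]
      simp [pvFinish, pvPairs, pvStepB]
  | succ k ih =>
      intro j ims ica lms hj h1
      have hlt : j < (v.length : Int) := by omega
      rw [PySem.List.pyRange_one_cons hlt]
      simp only [List.foldl_cons, List.filter_cons]
      by_cases hb : pvIsBreak v j = true
      · have hd : ((PySem.List.pyGetD v j 0 - PySem.List.pyGetD v (j - 1) 0) == 1 ||
            (PySem.List.pyGetD v j 0 - PySem.List.pyGetD v (j - 1) 0) == -1) = false := by
          have := hb; simp only [pvIsBreak] at this; rwa [Bool.not_eq_true'] at this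
        have hstep : pvStepA v (ims, ica, lms, j - ica) j =
            (if j - ica > lms then (ica, j, j - ica, (1 : Int)) else (ims, j, lms, 1)) := by
          simp only [pvStepA, hd]; simp
        rw [hb, if_pos rfl, hstep]
        by_cases hc : j - ica > lms
        · rw [if_pos hc]
          have := ih (j + 1) ica j (j - ica) (by omega) (by omega)
          rw [show j + 1 - j = (1 : Int) from by omega] at this
          rw [this, List.cons_append, pvPairs_cons]
          simp [pvStepB, hc]
        · rw [if_neg hc]
          have := ih (j + 1) ims j lms (by omega) (by omega)
          rw [show j + 1 - j = (1 : Int) from by omega] at this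
          rw [this, List.cons_append, pvPairs_cons]
          simp [pvStepB, hc]
      · have hb' : pvIsBreak v j = false := by simpa using hb
        have hd : ((PySem.List.pyGetD v j 0 - PySem.List.pyGetD v (j - 1) 0) == 1 ||
            (PySem.List.pyGetD v j 0 - PySem.List.pyGetD v (j - 1) 0) == -1) = true := by
          have := hb'; simp only [pvIsBreak] at this; rwa [Bool.not_eq_false'] at this
        have heq : j + 1 - ica = (j - ica) + 1 := by omega
        have hstep : pvStepA v (ims, ica, lms, j - ica) j = (ims, ica, lms, j + 1 - ica) := by
          rw [heq]; simp only [pvStepA, hd]; simp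
        rw [hb', if_neg (by simp), hstep]
        exact ih (j + 1) ims ica lms (by omega) (by omega)

-- ===== VERDICT (by name: the statement is the Claim_ definition above) =====
theorem subsecuencia_mas_larga_spec : Claim_equal_subsecuencia_mas_larga := by
  intro v _
  unfold Spec_subsecuencia_mas_larga subsecuencia_mas_larga subsecuencia_mas_larga_alt
  cases v with
  | nil => decide
  | cons x xs =>
      have := pvMain (x :: xs) xs.length 1 0 0 1 (by simp) (by simp)
      rw [show (1 : Int) - 0 = 1 from rfl] at this
      simpa [pvFinish, pvPairs] using this
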